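-- pv_equiv track=rewrite | github.com/lucaSartore/genetic-fuzzing-py | src/dataset/output/basic_calculator_ii.py | basic_calculator_ii
-- ===== SOURCE A (Python) =====
-- def basic_calculator_ii(s: str) -> int:
--     """
--     Evaluates a string expression with '+', '-', '*', '/' and no parentheses.
--     Uses a single-pass, stack-based approach to handle operator precedence.
--     Multiplication and division operations are performed immediately due to higher precedence.
--     Addition and subtraction are deferred and processed by summing the final stack elements.
--     Integer division truncates towards zero (e.g., 3/2 = 1, -3/2 = -1).
--
--     Args:
--         s (str): The input string expression containing digits, '+', '-', '*', '/', and spaces.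
--                  Assumes valid expressions with non-negative numbers being operands,
--                  or unary minus at the start being implicitly handled as '0 - number'.
--
--     Returns:
--         int: The integer result of the expression evaluation.
--     """
--     if not s:
--         return 0
--
--     stack: list[int] = []
--     current_number: int = 0
--     # Initialize with a '+' operator. This effectively treats the expression as if it starts
--     # with a '0 +' prefix, ensuring the first number is correctly pushed onto the stack
--     # (e.g., "3+2" is treated as "0+3+2"). This also correctly handles expressions
--     # that might implicitly start with a unary minus like "-3+2" as "0-3+2", evaluating to -1.
--     operator: str = '+'
--
--     # Iterate through the string, including an implicit "end-of-string" check at `i == len(s) - 1`.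
--     # This ensures that the last number and its preceding operation are processed.
--     for i in range(len(s)):
--         char = s[i]
--
--         # If the character is a digit, build the current number
--         if '0' <= char <= '9':
--             current_number = current_number * 10 + int(char)
--
--         # If the character is an operator OR it's the last character of the string:
--         # This condition triggers the processing of the `current_number` using the `operator`.
--         # Spaces are effectively ignored because they are neither digits nor operators,
--         # and they do not trigger this processing logic.
--         if (char in "+-*/" or i == len(s) - 1):
--             if operator == '+':
--                 stack.append(current_number)
--             elif operator == '-':
--                 stack.append(-current_number)
--             elif operator == '*':
--                 # Pop the last number from the stack, perform multiplication, and push the result back.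
--                 prev_num = stack.pop()
--                 stack.append(prev_num * current_number)
--             elif operator == '/':
--                 # Pop the last number, perform division, and push the result back.
--                 # We use int(prev_num / current_number) to achieve integer division
--                 # that truncates towards zero (e.g., int(-3 / 2) == -1, not -2 like Python's //).
--                 prev_num = stack.pop()
--                 stack.append(int(prev_num / current_number))
--
--             # After processing the `current_number` with its `operator`:
--             # Update the `operator` to the new character (if it's an actual operator)
--             # and reset `current_number` for parsing the next operand.
--             if char in "+-*/":
--                 operator = char
--             current_number = 0
--
--     # After iterating through the entire string, the stack will contain numbers that
--     # represent the results of multiplications/divisions, and numbers for additions/subtractions.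
--     # Summing all elements in the stack gives the final result.
--     return sum(stack)
-- ===== SOURCE B (Python) =====
-- def _tokenize(s):
--     """Stage 1: split the expression into (pending_operator, operand) pairs, in order."""
--     tokens = []
--     num = 0
--     op = '+'
--     n = len(s)
--     for i, c in enumerate(s):
--         if '0' <= c <= '9':
--             num = num * 10 + int(c)
--         if c in '+-*/' or i == n - 1:
--             tokens.append((op, num))
--             num = 0
--             if c in '+-*/':
--                 op = c
--     return tokens
--
--
-- def basic_calculator_ii(s: str) -> int:
--     # Stage 2: evaluate the token list with two accumulators
--     # (total = sum of finished terms, term = current product/quotient).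
--     total = 0
--     term = 0
--     for op, v in _tokenize(s):
--         if op == '+':
--             total += term
--             term = v
--         elif op == '-':
--             total += term
--             term = -v
--         elif op == '*':
--             term = term * v
--         else:
--             term = int(term / v)
--     return total + term
-- ===== Notes on version B (the rewrite author's own statement) =====
-- stated objective: alternative
-- what changed: B replaces A's fused stack-based loop by a two-stage pipeline: a tokenizer that turns the string into a list of (pending-operator, operand) pairs, then a separate evaluator that folds those pairs with two integer accumulators (sum of finished terms, current product/quotient term) instead of pushing/popping a stack and summing it at the end.
import Mathlib
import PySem

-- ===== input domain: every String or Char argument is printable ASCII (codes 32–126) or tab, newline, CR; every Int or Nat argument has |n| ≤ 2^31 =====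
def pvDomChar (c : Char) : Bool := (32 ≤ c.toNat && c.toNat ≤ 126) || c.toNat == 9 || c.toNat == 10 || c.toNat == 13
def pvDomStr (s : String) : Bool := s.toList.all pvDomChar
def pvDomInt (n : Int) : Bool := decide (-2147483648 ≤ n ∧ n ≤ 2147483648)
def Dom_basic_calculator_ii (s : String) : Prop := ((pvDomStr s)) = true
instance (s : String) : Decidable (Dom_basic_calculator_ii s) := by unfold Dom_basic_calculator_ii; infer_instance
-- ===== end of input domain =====

-- B splits A's single fused stack loop into two stages: a tokenizer that turns the string
-- into a list of (pending operator, operand) pairs, and a separate evaluator that folds the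
-- pairs with two integer accumulators (sum of finished terms, current term) — no stack.
-- Objective: simpler/alternative decomposition; same O(n) cost.

-- ===== PORT A =====

def pvOps : List Char := ['+', '-', '*', '/']

-- one iteration of A's `for i in range(len(s))` loop; state = (stack, current_number, operator).
-- `int(prev_num / current_number)` is PySem.Int.truncdiv (exact for |operands| < 2^53);
-- the `none` branch of pop? is unreachable (operator is '*'/'/' only after a push).
def pvStepA (n : Int) (st : List Int × Int × Char) (p : Int × Char) : List Int × Int × Char :=
  let (stack, cur0, op) := st
  let (i, char) := p
  let cur := if '0' ≤ char ∧ char ≤ '9' then cur0 * 10 + ((char.toNat : Int) - 48) else cur0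
  if char ∈ pvOps ∨ i = n - 1 then
    let stack' :=
      if op = '+' then stack ++ [cur]
      else if op = '-' then stack ++ [-cur]
      else if op = '*' then
        match PySem.List.pop? stack with
        | some (prev, rest) => rest ++ [prev * cur]
        | none => stack
      else if op = '/' then
        match PySem.List.pop? stack with
        | some (prev, rest) => rest ++ [PySem.Int.truncdiv prev cur]
        | none => stack
      else stack
    (stack', 0, if char ∈ pvOps then char else op)
  else (stack, cur, op)

def basic_calculator_ii (s : String) : Int :=
  if s.toList = [] then 0
  else
    let n : Int := (s.toList.length : Int)
    let fin := (PySem.List.enumerate s.toList 0).foldl (pvStepA n) ([], 0, '+')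
    fin.1.sum

-- ===== PORT B =====

-- stage 1 of Source B: the tokenizer loop (index check `i == n - 1` becomes `rest = []`,
-- the obvious structural recursion over the remaining characters).
def pvTokenize : List Char → Int → Char → List (Char × Int)
  | [], _, _ => []
  | c :: rest, num, op =>
    let num' := if '0' ≤ c ∧ c ≤ '9' then num * 10 + ((c.toNat : Int) - 48) else num
    if c ∈ pvOps then (op, num') :: pvTokenize rest 0 c
    else if rest = [] then [(op, num')]
    else pvTokenize rest num' op

-- stage 2 of Source B: evaluate the token list with accumulators (total, term);
-- `int(term / v)` is PySem.Int.truncdiv.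
def pvEval : List (Char × Int) → Int → Int → Int
  | [], total, term => total + term
  | (op, v) :: ts, total, term =>
    if op = '+' then pvEval ts (total + term) v
    else if op = '-' then pvEval ts (total + term) (-v)
    else if op = '*' then pvEval ts total (term * v)
    else pvEval ts total (PySem.Int.truncdiv term v)

def basic_calculator_ii_alt (s : String) : Int :=
  pvEval (pvTokenize s.toList 0 '+') 0 0

-- ===== PRECONDITION & SPEC =====

-- the operand following a '/' (the digit characters before the next operator character or
-- the end of the string) contains a nonzero digit
def pvSegNonzero : List Char → Bool
  | [] => false
  | c :: rest =>
    if c ∈ pvOps then false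
    else if '1' ≤ c ∧ c ≤ '9' then true
    else pvSegNonzero rest

def pvNoZeroDiv : List Char → Bool
  | [] => true
  | c :: rest =>
    (if c = '/' then (rest.isEmpty || pvSegNonzero rest) else true) && pvNoZeroDiv rest

-- Pre_ excludes exactly the inputs on which A raises ZeroDivisionError: a '/' whose
-- following operand is zero (no nonzero digit before the next operator or end of string).
def Pre_basic_calculator_ii (s : String) : Prop := pvNoZeroDiv s.toList = true
instance (s : String) : Decidable (Pre_basic_calculator_ii s) := by
  unfold Pre_basic_calculator_ii; infer_instance

def pvWitness_basic_calculator_ii : String := "3+5*2/4-1"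

def Spec_basic_calculator_ii (s : String) (out : Int) : Prop := out = basic_calculator_ii_alt s
instance (s : String) (out : Int) : Decidable (Spec_basic_calculator_ii s out) := by
  unfold Spec_basic_calculator_ii; infer_instance

-- ===== CLAIM (what is proved, stated in full; the proofs are below) =====
def Claim_equal_basic_calculator_ii : Prop := ∀ (s : String), Dom_basic_calculator_ii s → Pre_basic_calculator_ii s → Spec_basic_calculator_ii s (basic_calculator_ii s)

-- ===== LEMMAS AND PROOFS =====

-- proof intermediate (not part of either port): the two stages of B fused into one pass;
-- state = (total, term, current_number, operator)
def pvFusedStep (n : Int) (st : Int × Int × Int × Char) (p : Int × Char) : Int × Int × Int × Char :=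
  let (res, last, cur0, op) := st
  let (i, char) := p
  let cur := if '0' ≤ char ∧ char ≤ '9' then cur0 * 10 + ((char.toNat : Int) - 48) else cur0
  if char ∈ pvOps ∨ i = n - 1 then
    let rl :=
      if op = '+' then (res + last, cur)
      else if op = '-' then (res + last, -cur)
      else if op = '*' then (res, last * cur)
      else if op = '/' then (res, PySem.Int.truncdiv last cur)
      else (res, last)
    (rl.1, rl.2, 0, if char ∈ pvOps then char else op)
  else (res, last, cur, op)

-- the simulation relation between A's state and the fused state: current numbers and
-- operators agree, and A's stack is either empty (with total = term = 0) or carries the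
-- fused `term` on top with the remaining elements summing to the fused `total`.
def pvInv (a : List Int × Int × Char) (b : Int × Int × Int × Char) : Prop :=
  a.2.1 = b.2.2.1 ∧ a.2.2 = b.2.2.2 ∧
    ((a.1 = [] ∧ b.1 = 0 ∧ b.2.1 = 0) ∨ (∃ t, a.1 = t ++ [b.2.1] ∧ b.1 = t.sum))

theorem pvInv_step (n : Int) (a : List Int × Int × Char) (b : Int × Int × Int × Char)
    (p : Int × Char) (h : pvInv a b) : pvInv (pvStepA n a p) (pvFusedStep n b p) := by
  obtain ⟨stack, cur, op⟩ := a
  obtain ⟨res, last, cur', op'⟩ := b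
  obtain ⟨i, char⟩ := p
  obtain ⟨h1, h2, h3⟩ := h
  simp only at h1 h2
  subst h1 h2
  simp only [pvStepA, pvFusedStep, pvInv]
  by_cases htr : char ∈ pvOps ∨ i = n - 1
  · simp only [if_pos htr]
    generalize (if '0' ≤ char ∧ char ≤ '9' then cur * 10 + ((char.toNat : Int) - 48) else cur) = c1
    rcases h3 with ⟨he, hr, hl⟩ | ⟨t, hst, hr⟩
    · simp only at he hr hl
      subst he hr hl
      split_ifs <;>
        first
          | (refine ⟨?_, ?_, Or.inr ⟨[], ?_, ?_⟩⟩ <;> simp) <;> done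
          | (refine ⟨?_, ?_, Or.inl ⟨?_, ?_, ?_⟩⟩ <;>
              simp [PySem.List.pop?, PySem.List.pyIdx?, PySem.Int.truncdiv])
    · simp only at hst hr
      subst hst hr
      simp only [PySem.List.pop?_last]
      split_ifs <;>
        first
          | (refine ⟨?_, ?_, Or.inr ⟨t ++ [last], ?_, ?_⟩⟩ <;> simp) <;> done
          | (refine ⟨?_, ?_, Or.inr ⟨t, ?_, ?_⟩⟩ <;> simp)
  · simp only [if_neg htr]
    exact ⟨by trivial, by trivial, h3⟩

theorem pvInv_foldl (n : Int) (l : List (Int × Char))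
    (a : List Int × Int × Char) (b : Int × Int × Int × Char) (h : pvInv a b) :
    pvInv (l.foldl (pvStepA n) a) (l.foldl (pvFusedStep n) b) := by
  induction l generalizing a b with
  | nil => exact h
  | cons p l ih => exact ih _ _ (pvInv_step n a b p h)

-- the fused pass computes exactly pvEval of pvTokenize (fold/unfold fusion);
-- the running operator is always one of the four operator characters
theorem pvFused_eval (l : List Char) (i n res term cur : Int) (op : Char)
    (hn : i + (l.length : Int) = n) (hl : l ≠ []) (hop : op ∈ pvOps) :
    (((PySem.List.enumerate l i).foldl (pvFusedStep n) (res, term, cur, op)).1 +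
      ((PySem.List.enumerate l i).foldl (pvFusedStep n) (res, term, cur, op)).2.1)
      = pvEval (pvTokenize l cur op) res term := by
  induction l generalizing i res term cur op with
  | nil => exact absurd rfl hl
  | cons c rest ih =>
    have hop4 : op = '+' ∨ op = '-' ∨ op = '*' ∨ op = '/' := by simpa [pvOps] using hop
    rw [PySem.List.enumerate_cons]
    by_cases hr : rest = []
    · subst hr
      have hi : i = n - 1 := by simp at hn; omega
      simp only [List.foldl, PySem.List.enumerate_nil, pvFusedStep, pvTokenize, hi]
      rcases hop4 with h|h|h|h <;> subst h <;> by_cases hc : c ∈ pvOps <;>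
        simp [hc, pvEval]
    · have hi : ¬ i = n - 1 := by
        have : (1:Int) ≤ rest.length := by
          cases rest with | nil => exact absurd rfl hr | cons a b => simp
        simp at hn; omega
      simp only [List.foldl, pvFusedStep, pvTokenize]
      by_cases hc : c ∈ pvOps
      · simp only [hc, hi, true_or, if_true]
        rw [ih (i + 1) _ _ _ _ (by simp at hn ⊢; omega) hr hc]
        rcases hop4 with h|h|h|h <;> subst h <;> simp [pvEval]
      · simp only [hc, hi, false_or, if_neg, not_false_iff, hr]
        exact ih (i + 1) _ _ _ _ (by simp at hn ⊢; omega) hr hop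

-- ===== VERDICT (by name: the statement is the Claim_ definition above) =====
theorem basic_calculator_ii_spec : Claim_equal_basic_calculator_ii := by
  intro s _ _
  unfold Spec_basic_calculator_ii basic_calculator_ii basic_calculator_ii_alt
  by_cases he : s.toList = []
  · simp [he, pvTokenize, pvEval]
  · simp only [if_neg he]
    have h := pvInv_foldl ((s.toList.length : Int)) (PySem.List.enumerate s.toList 0)
      ([], 0, '+') (0, 0, 0, '+') ⟨rfl, rfl, Or.inl ⟨rfl, rfl, rfl⟩⟩
    have hfe := pvFused_eval s.toList 0 ((s.toList.length : Int)) 0 0 0 '+' (by omega) he (by simp [pvOps])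
    obtain ⟨-, -, h3⟩ := h
    rcases h3 with ⟨h1, h2, h3⟩ | ⟨t, h1, h2⟩
    · rw [h1, ← hfe, h2, h3]; simp
    · rw [h1, ← hfe, h2]; simp
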